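-- pv_equiv track=rewrite | github.com/shraddhapiparia/CATDroid | framework/utils/selection.py | get_min_frequency_event_hashes
-- ===== SOURCE A (Python) =====
-- def get_min_frequency_event_hashes(event_frequencies):
--     min_frequency = float("inf")
--     min_frequency_event_hashes = []
--     for event_hash, event_frequency in event_frequencies.items():
--         if event_frequency < min_frequency:
--             min_frequency_event_hashes = [event_hash]
--             min_frequency = event_frequency
--         elif event_frequency == min_frequency:
--             min_frequency_event_hashes.append(event_hash)
--
--     return min_frequency_event_hashes
-- ===== SOURCE B (Python) =====
-- def get_min_frequency_event_hashes(event_frequencies):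
--     if not event_frequencies:
--         return []
--     m = min(event_frequencies.values())
--     return [k for k, v in event_frequencies.items() if v == m]
-- ===== Notes on version B (the rewrite author's own statement) =====
-- stated objective: simpler
-- what changed: Replaced the single running-minimum loop that rebuilds/extends the result list as it goes with two plain passes: min() over the values, then a comprehension collecting keys with that value (empty dict guarded first).
import Mathlib
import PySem

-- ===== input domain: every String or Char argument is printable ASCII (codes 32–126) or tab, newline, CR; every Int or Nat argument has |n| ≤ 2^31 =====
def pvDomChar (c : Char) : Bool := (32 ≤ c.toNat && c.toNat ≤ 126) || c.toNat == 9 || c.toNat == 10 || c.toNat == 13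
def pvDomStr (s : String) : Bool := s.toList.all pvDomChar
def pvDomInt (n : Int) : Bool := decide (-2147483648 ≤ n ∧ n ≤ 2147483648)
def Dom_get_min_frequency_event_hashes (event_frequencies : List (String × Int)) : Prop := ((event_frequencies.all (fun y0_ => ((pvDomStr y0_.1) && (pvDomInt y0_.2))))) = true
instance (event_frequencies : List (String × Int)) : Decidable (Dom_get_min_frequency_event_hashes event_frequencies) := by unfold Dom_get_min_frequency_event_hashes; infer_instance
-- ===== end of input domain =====

-- B replaces A's single running-minimum pass by two simpler passes (min of the values, then collect matching keys); same result, same cost.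


-- ===== PORT A =====
-- the loop state: (min_frequency, min_frequency_event_hashes); none = float("inf")
def gmfehLoop (items : List (String × Int)) (st : Option Int × List String) :
    Option Int × List String :=
  match items, st with
  | [], st => st
  | (h, v) :: t, (m, acc) =>
    match m with
    | none => gmfehLoop t (some v, [h])              -- v < inf
    | some mv =>
      if v < mv then gmfehLoop t (some v, [h])
      else if v = mv then gmfehLoop t (some mv, acc ++ [h])
      else gmfehLoop t (some mv, acc)

def get_min_frequency_event_hashes (event_frequencies : List (String × Int)) : List String :=
  (gmfehLoop event_frequencies (none, [])).2

-- ===== PORT B =====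
def get_min_frequency_event_hashes_alt (event_frequencies : List (String × Int)) : List String :=
  match PySem.List.min? (event_frequencies.map (·.2)) (fun x => x) with
  | none => []                                        -- empty dict guard
  | some m => (event_frequencies.filter (fun p => p.2 = m)).map (·.1)

-- ===== PRECONDITION & SPEC =====
def Spec_get_min_frequency_event_hashes (event_frequencies : List (String × Int)) (out : List String) : Prop := out = get_min_frequency_event_hashes_alt event_frequencies
instance (event_frequencies : List (String × Int)) (out : List String) : Decidable (Spec_get_min_frequency_event_hashes event_frequencies out) := by unfold Spec_get_min_frequency_event_hashes; infer_instance

-- ===== CLAIM (what is proved, stated in full; the proofs are below) =====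
def Claim_equal_get_min_frequency_event_hashes : Prop := ∀ (event_frequencies : List (String × Int)), Dom_get_min_frequency_event_hashes event_frequencies → Spec_get_min_frequency_event_hashes event_frequencies (get_min_frequency_event_hashes event_frequencies)

-- ===== LEMMAS AND PROOFS =====

theorem foldl_min_le (t : List Int) (m : Int) : t.foldl min m ≤ m := by
  induction t generalizing m with
  | nil => simp
  | cons v t ih => exact le_trans (ih (min m v)) (min_le_left _ _)

-- characterisation of A's loop from a finite-minimum state
theorem gmfehLoop_some (t : List (String × Int)) (m : Int) (acc : List String) :
    gmfehLoop t (some m, acc) =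
      (some ((t.map (·.2)).foldl min m),
       (if (t.map (·.2)).foldl min m = m then acc else []) ++
         (t.filter (fun p => p.2 = (t.map (·.2)).foldl min m)).map (·.1)) := by
  induction t generalizing m acc with
  | nil => simp [gmfehLoop]
  | cons p t ih =>
    obtain ⟨h, v⟩ := p
    have hle : ∀ x : Int, (t.map (·.2)).foldl min x ≤ x := fun x => foldl_min_le _ x
    simp only [gmfehLoop]
    rcases lt_trichotomy v m with hv | hv | hv
    · rw [if_pos hv, ih]
      have hmin : min m v = v := min_eq_right hv.le
      have hne : (t.map (·.2)).foldl min v ≠ m :=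
        ne_of_lt (lt_of_le_of_lt (hle v) hv)
      simp only [List.map_cons, List.foldl_cons, hmin, List.filter_cons]
      rw [if_neg hne]
      by_cases hveq : (t.map (·.2)).foldl min v = v
      · simp [hveq]
      · have : ¬ (v = (t.map (·.2)).foldl min v) := fun h' => hveq h'.symm
        simp [hveq, this]
    · subst hv
      rw [if_neg (lt_irrefl _), if_pos rfl, ih]
      simp only [List.map_cons, List.foldl_cons, min_self, List.filter_cons]
      by_cases hm : (t.map (·.2)).foldl min v = v
      · simp [hm]
      · have : ¬ (v = (t.map (·.2)).foldl min v) := fun h' => hm h'.symm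
        simp [hm, this]
    · rw [if_neg (not_lt.mpr hv.le), if_neg (ne_of_gt hv), ih]
      have hmin : min m v = m := min_eq_left hv.le
      have hne : (t.map (·.2)).foldl min m ≠ v :=
        ne_of_lt (lt_of_le_of_lt (hle m) hv)
      simp only [List.map_cons, List.foldl_cons, hmin, List.filter_cons]
      have : ¬ (v = (t.map (·.2)).foldl min m) := fun h' => hne h'.symm
      simp [this]

-- ===== VERDICT (by name: the statement is the Claim_ definition above) =====
theorem get_min_frequency_event_hashes_spec : Claim_equal_get_min_frequency_event_hashes := by
  intro l _
  unfold Spec_get_min_frequency_event_hashes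
  unfold get_min_frequency_event_hashes get_min_frequency_event_hashes_alt
  cases l with
  | nil => simp [gmfehLoop, PySem.List.min?]
  | cons p t =>
    obtain ⟨h, v⟩ := p
    simp only [gmfehLoop, List.map_cons]
    rw [PySem.List.min?_id_cons, gmfehLoop_some]
    simp only [List.filter_cons]
    by_cases hm : (t.map (·.2)).foldl min v = v
    · simp [hm]
    · have : ¬ (v = (t.map (·.2)).foldl min v) := fun h' => hm h'.symm
      simp [hm, this]
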